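-- pv_equiv track=rewrite | github.com/parallelworks/hpc_status | src/collectors/pw_cluster.py | _parse_queue_output
-- ===== SOURCE A (Python) =====
-- from typing import Any, Dict, List, Optional
--
-- def _parse_queue_output(queue_output: str) -> Dict[str, Any]:
--     """Parse the queue output from SSH command."""
--     queue_data = {
--         "queues": [],
--         "nodes": [],
--     }
--
--     lines = queue_output.strip().split("\n")
--
--     in_queue_section = False
--     in_node_section = False
--
--     for line in lines:
--         if "QUEUE INFORMATION:" in line or "Queue Name" in line:
--             in_queue_section = True
--             in_node_section = False
--             continue
--
--         if "NODE INFORMATION:" in line or "Node Type" in line: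
--             in_node_section = True
--             in_queue_section = False
--             continue
--
--         if in_queue_section:
--             if (
--                 line.startswith("=")
--                 or line.startswith("-")
--                 or line.startswith("|")
--                 or not line.strip()
--             ):
--                 continue
--
--             if "Queue Name" not in line and line.strip():
--                 parts = line.split()
--                 if len(parts) >= 10:
--                     try:
--                         queue_info = {
--                             "queue_name": parts[0].strip(),
--                             "max_walltime": parts[1].strip(),
--                             "max_jobs": parts[2].strip(),
--                             "max_cores": parts[3].strip(),
--                             "max_cores_per_job": parts[4].strip(),
--                             "jobs_running": parts[5].strip(),
--                             "jobs_pending": parts[6].strip(),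
--                             "cores_running": parts[7].strip(),
--                             "cores_pending": parts[8].strip(),
--                             "queue_type": parts[9].strip(),
--                         }
--                         queue_data["queues"].append(queue_info)
--                     except (ValueError, IndexError):
--                         continue
--
--         if in_node_section:
--             if (
--                 line.startswith("=")
--                 or line.startswith("-")
--                 or line.startswith("|")
--                 or not line.strip()
--             ):
--                 continue
--
--             if "Node Type" not in line and line.strip():
--                 parts = line.split()
--                 if len(parts) >= 5:
--                     try:
--                         node_info = {
--                             "node_type": parts[0].strip(),
--                             "nodes_available": parts[1].strip(),
--                             "cores_per_node": parts[2].strip(),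
--                             "cores_available": parts[3].strip(),
--                             "cores_running": parts[4].strip(),
--                             "cores_free": parts[5].strip()
--                             if len(parts) > 5
--                             else "0",
--                         }
--                         queue_data["nodes"].append(node_info)
--                     except (ValueError, IndexError):
--                         continue
--
--     return queue_data
-- ===== SOURCE B (Python) =====
-- _QUEUE_FIELDS = [
--     "queue_name", "max_walltime", "max_jobs", "max_cores",
--     "max_cores_per_job", "jobs_running", "jobs_pending",
--     "cores_running", "cores_pending", "queue_type",
-- ]
-- _NODE_FIELDS = [
--     "node_type", "nodes_available", "cores_per_node",
--     "cores_available", "cores_running",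
-- ]
--
--
-- def _bucket_lines(queue_output):
--     """One pass: route each non-header line to its current section's bucket."""
--     queue_lines, node_lines = [], []
--     bucket = None
--     for line in queue_output.strip().split("\n"):
--         if "QUEUE INFORMATION:" in line or "Queue Name" in line:
--             bucket = queue_lines
--         elif "NODE INFORMATION:" in line or "Node Type" in line:
--             bucket = node_lines
--         elif bucket is not None:
--             bucket.append(line)
--     return queue_lines, node_lines
--
--
-- def _rows(lines, min_fields):
--     """Keep data lines (no ruling/blank), split into fields, guard the width."""
--     return [
--         parts
--         for parts in (line.split() for line in lines
--                       if not line.startswith(("=", "-", "|")) and line.strip())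
--         if len(parts) >= min_fields
--     ]
--
--
-- def _parse_queue_output(queue_output):
--     queue_lines, node_lines = _bucket_lines(queue_output)
--     queues = [dict(zip(_QUEUE_FIELDS, parts)) for parts in _rows(queue_lines, 10)]
--     nodes = [
--         dict(zip(_NODE_FIELDS, parts),
--              cores_free=parts[5] if len(parts) > 5 else "0")
--         for parts in _rows(node_lines, 5)
--     ]
--     return {"queues": queues, "nodes": nodes}
-- ===== Notes on version B (the rewrite author's own statement) =====
-- stated objective: alternative
-- what changed: B replaces A's single interleaved stateful loop (section flags plus ten hand-written dict assignments inline) by two passes: a bucketing pass that routes non-header lines into queue/node line lists, and a second pass that filters/splits each bucket and builds each dict declaratively by zipping an ordered field-name table with the split fields.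
import Mathlib
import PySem

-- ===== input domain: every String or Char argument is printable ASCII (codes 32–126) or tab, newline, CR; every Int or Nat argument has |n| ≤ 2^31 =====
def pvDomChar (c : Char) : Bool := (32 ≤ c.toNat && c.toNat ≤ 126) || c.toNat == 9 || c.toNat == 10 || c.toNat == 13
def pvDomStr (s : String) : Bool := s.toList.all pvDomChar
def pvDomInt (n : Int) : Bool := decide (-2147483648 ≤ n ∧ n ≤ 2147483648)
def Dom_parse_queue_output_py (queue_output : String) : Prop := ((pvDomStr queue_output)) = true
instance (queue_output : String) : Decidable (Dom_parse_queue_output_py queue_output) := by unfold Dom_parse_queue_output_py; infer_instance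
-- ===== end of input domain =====

-- B replaces A's interleaved stateful line parser by a bucketing pass plus a declarative
-- field-spec (zip) table; same O(n) cost, different decomposition (objective: alternative).

-- ===== PORT A =====
-- queue_info dict literal of A (each part .strip()ped, as in A)
def pvA_rowQ (parts : List String) : List (String × String) :=
  [("queue_name", PySem.Str.strip (PySem.List.pyGetD parts 0 "")),
   ("max_walltime", PySem.Str.strip (PySem.List.pyGetD parts 1 "")),
   ("max_jobs", PySem.Str.strip (PySem.List.pyGetD parts 2 "")),
   ("max_cores", PySem.Str.strip (PySem.List.pyGetD parts 3 "")),
   ("max_cores_per_job", PySem.Str.strip (PySem.List.pyGetD parts 4 "")),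
   ("jobs_running", PySem.Str.strip (PySem.List.pyGetD parts 5 "")),
   ("jobs_pending", PySem.Str.strip (PySem.List.pyGetD parts 6 "")),
   ("cores_running", PySem.Str.strip (PySem.List.pyGetD parts 7 "")),
   ("cores_pending", PySem.Str.strip (PySem.List.pyGetD parts 8 "")),
   ("queue_type", PySem.Str.strip (PySem.List.pyGetD parts 9 ""))]

-- node_info dict literal of A
def pvA_rowN (parts : List String) : List (String × String) :=
  [("node_type", PySem.Str.strip (PySem.List.pyGetD parts 0 "")),
   ("nodes_available", PySem.Str.strip (PySem.List.pyGetD parts 1 "")),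
   ("cores_per_node", PySem.Str.strip (PySem.List.pyGetD parts 2 "")),
   ("cores_available", PySem.Str.strip (PySem.List.pyGetD parts 3 "")),
   ("cores_running", PySem.Str.strip (PySem.List.pyGetD parts 4 "")),
   ("cores_free", if 5 < parts.length then PySem.Str.strip (PySem.List.pyGetD parts 5 "") else "0")]

-- the 'if in_node_section:' block of A (runs unless an earlier branch did 'continue')
def pvA_nodeStep (st : Bool × Bool × List (List (String × String)) × List (List (String × String)))
    (line : String) : Bool × Bool × List (List (String × String)) × List (List (String × String)) :=
  let (inQ, inN, qs, ns) := st
  if inN then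
    if PySem.Str.startswith line "=" || PySem.Str.startswith line "-" ||
       PySem.Str.startswith line "|" || decide (PySem.Str.strip line = "") then
      (inQ, inN, qs, ns)
    else if !(PySem.Str.isIn "Node Type" line) && decide (PySem.Str.strip line ≠ "") then
      let parts := PySem.Str.split₀ line
      if 5 ≤ parts.length then (inQ, inN, qs, ns ++ [pvA_rowN parts]) else (inQ, inN, qs, ns)
    else (inQ, inN, qs, ns)
  else (inQ, inN, qs, ns)

-- one iteration of A's 'for line in lines' loop
def pvA_step (st : Bool × Bool × List (List (String × String)) × List (List (String × String)))
    (line : String) : Bool × Bool × List (List (String × String)) × List (List (String × String)) :=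
  let (inQ, inN, qs, ns) := st
  if PySem.Str.isIn "QUEUE INFORMATION:" line || PySem.Str.isIn "Queue Name" line then
    (true, false, qs, ns)
  else if PySem.Str.isIn "NODE INFORMATION:" line || PySem.Str.isIn "Node Type" line then
    (false, true, qs, ns)
  else if inQ then
    if PySem.Str.startswith line "=" || PySem.Str.startswith line "-" ||
       PySem.Str.startswith line "|" || decide (PySem.Str.strip line = "") then
      (inQ, inN, qs, ns)  -- 'continue': the node block is skipped
    else if !(PySem.Str.isIn "Queue Name" line) && decide (PySem.Str.strip line ≠ "") then
      let parts := PySem.Str.split₀ line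
      pvA_nodeStep (if 10 ≤ parts.length then (inQ, inN, qs ++ [pvA_rowQ parts], ns)
                    else (inQ, inN, qs, ns)) line
    else pvA_nodeStep (inQ, inN, qs, ns) line
  else pvA_nodeStep (inQ, inN, qs, ns) line

def parse_queue_output_py (queue_output : String) : List (String × List (List (String × String))) :=
  let lines := (PySem.Str.split? (PySem.Str.strip queue_output) "\n").getD []
  let fin := lines.foldl pvA_step ((false, false, [], []) : Bool × Bool × List (List (String × String)) × List (List (String × String)))
  [("queues", fin.2.2.1), ("nodes", fin.2.2.2)]

-- ===== PORT B =====
def pvB_QUEUE_FIELDS : List String :=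
  ["queue_name", "max_walltime", "max_jobs", "max_cores", "max_cores_per_job",
   "jobs_running", "jobs_pending", "cores_running", "cores_pending", "queue_type"]

def pvB_NODE_FIELDS : List String :=
  ["node_type", "nodes_available", "cores_per_node", "cores_available", "cores_running"]

-- _bucket_lines: bucket = none (None) / some true (queue_lines) / some false (node_lines)
def pvB_bucketStep (st : Option Bool × List String × List String) (line : String) :
    Option Bool × List String × List String :=
  let (b, qls, nls) := st
  if PySem.Str.isIn "QUEUE INFORMATION:" line || PySem.Str.isIn "Queue Name" line then
    (some true, qls, nls)
  else if PySem.Str.isIn "NODE INFORMATION:" line || PySem.Str.isIn "Node Type" line then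
    (some false, qls, nls)
  else if b == some true then (b, qls ++ [line], nls)
  else if b == some false then (b, qls, nls ++ [line])
  else (b, qls, nls)

-- _rows: keep data lines, split, guard the width
def pvB_rows (lines : List String) (minFields : Nat) : List (List String) :=
  ((lines.filter (fun l =>
      !(PySem.Str.startswith l "=" || PySem.Str.startswith l "-" || PySem.Str.startswith l "|") &&
      decide (PySem.Str.strip l ≠ ""))).map PySem.Str.split₀).filter
    (fun parts => minFields ≤ parts.length)

-- dict(zip(_QUEUE_FIELDS, parts))
def pvB_rowQ (parts : List String) : List (String × String) :=
  pvB_QUEUE_FIELDS.zip parts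

-- dict(zip(_NODE_FIELDS, parts), cores_free=…)
def pvB_rowN (parts : List String) : List (String × String) :=
  pvB_NODE_FIELDS.zip parts ++
    [("cores_free", if 5 < parts.length then PySem.List.pyGetD parts 5 "" else "0")]

def parse_queue_output_py_alt (queue_output : String) : List (String × List (List (String × String))) :=
  let lines := (PySem.Str.split? (PySem.Str.strip queue_output) "\n").getD []
  let buckets := lines.foldl pvB_bucketStep ((none, [], []) : Option Bool × List String × List String)
  [("queues", (pvB_rows buckets.2.1 10).map pvB_rowQ),
   ("nodes", (pvB_rows buckets.2.2 5).map pvB_rowN)]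

-- ===== PRECONDITION & SPEC =====
def Spec_parse_queue_output_py (queue_output : String) (out : List (String × List (List (String × String)))) : Prop := out = parse_queue_output_py_alt queue_output
instance (queue_output : String) (out : List (String × List (List (String × String)))) : Decidable (Spec_parse_queue_output_py queue_output out) := by unfold Spec_parse_queue_output_py; infer_instance

-- ===== CLAIM (what is proved, stated in full; the proofs are below) =====
def Claim_equal_parse_queue_output_py : Prop := ∀ (queue_output : String), Dom_parse_queue_output_py queue_output → Spec_parse_queue_output_py queue_output (parse_queue_output_py queue_output)

-- ===== LEMMAS AND PROOFS =====

-- the section state A's two booleans encode, as B's bucket tag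
def pvToBucket (inQ inN : Bool) : Option Bool :=
  if inQ then some true else if inN then some false else none

-- pieces produced by split() contain no whitespace characters (invariant of split₀.go)
theorem pvGo_nospace : ∀ (s cur : List Char) (acc : List (List Char)),
    (∀ p ∈ acc, ∀ c ∈ p, PySem.Chars.isspace c = false) →
    (∀ c ∈ cur, PySem.Chars.isspace c = false) →
    ∀ p ∈ PySem.Chars.split₀.go s cur acc, ∀ c ∈ p, PySem.Chars.isspace c = false := by
  intro s
  induction s with
  | nil =>
    intro cur acc hacc hcur p hp
    rw [PySem.Chars.split₀.go] at hp
    split at hp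
    · exact hacc p (List.mem_reverse.mp hp)
    · rcases List.mem_cons.mp (List.mem_reverse.mp hp) with h | h
      · subst h; intro c hc; exact hcur c (List.mem_reverse.mp hc)
      · exact hacc p h
  | cons c rest ih =>
    intro cur acc hacc hcur p hp
    rw [PySem.Chars.split₀.go] at hp
    split at hp
    · split at hp
      · exact ih [] acc hacc (by simp) p hp
      · refine ih [] (cur.reverse :: acc) ?_ (by simp) p hp
        intro q hq
        rcases List.mem_cons.mp hq with h | h
        · subst h; intro c' hc'; exact hcur c' (List.mem_reverse.mp hc')
        · exact hacc q h
    · refine ih (c :: cur) acc hacc ?_ p hp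
      intro c' hc'
      rcases List.mem_cons.mp hc' with h | h
      · subst h; simp_all
      · exact hcur c' h

theorem pvStrip_self (p : List Char) (h : ∀ c ∈ p, PySem.Chars.isspace c = false) :
    PySem.Chars.strip p = p := by
  have drop : ∀ (q : List Char), (∀ c ∈ q, PySem.Chars.isspace c = false) →
      List.dropWhile PySem.Chars.isspace q = q := by
    intro q hq
    cases q with
    | nil => rfl
    | cons c t => simp [hq c (by simp)]
  unfold PySem.Chars.strip PySem.Chars.lstrip PySem.Chars.rstrip
  rw [drop p h, drop p.reverse (fun c hc => h c (List.mem_reverse.mp hc)), List.reverse_reverse]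

-- every piece of line.split() is strip-invariant
theorem pvStrStrip_split₀ (line : String) : ∀ p ∈ PySem.Str.split₀ line, PySem.Str.strip p = p := by
  intro p hp
  unfold PySem.Str.split₀ at hp
  obtain ⟨q, hq, rfl⟩ := List.mem_map.mp hp
  have hq' : ∀ c ∈ q, PySem.Chars.isspace c = false := by
    have : q ∈ PySem.Chars.split₀.go line.toList [] [] := by
      simpa [PySem.Chars.split₀] using hq
    exact pvGo_nospace line.toList [] [] (by simp) (by simp) q this
  apply String.toList_inj.mp
  rw [PySem.Str.toList_strip]
  simp [pvStrip_self _ (by simpa using hq')]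

-- A's hand-written queue dict is B's zip row (on ≥10 strip-invariant fields)
theorem pvRowQ_eq (parts : List String) (h : 10 ≤ parts.length)
    (hs : ∀ p ∈ parts, PySem.Str.strip p = p) : pvA_rowQ parts = pvB_rowQ parts := by
  rcases parts with _ | ⟨p0, parts⟩; · simp at h
  rcases parts with _ | ⟨p1, parts⟩; · simp at h
  rcases parts with _ | ⟨p2, parts⟩; · simp at h
  rcases parts with _ | ⟨p3, parts⟩; · simp at h
  rcases parts with _ | ⟨p4, parts⟩; · simp at h
  rcases parts with _ | ⟨p5, parts⟩; · simp at h
  rcases parts with _ | ⟨p6, parts⟩; · simp at h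
  rcases parts with _ | ⟨p7, parts⟩; · simp at h
  rcases parts with _ | ⟨p8, parts⟩; · simp at h
  rcases parts with _ | ⟨p9, parts⟩; · simp at h
  simp [pvA_rowQ, pvB_rowQ, pvB_QUEUE_FIELDS, PySem.List.pyGetD_ofNat', hs p0 (by simp), hs p1 (by simp), hs p2 (by simp), hs p3 (by simp),
        hs p4 (by simp), hs p5 (by simp), hs p6 (by simp), hs p7 (by simp), hs p8 (by simp),
        hs p9 (by simp)]

-- A's hand-written node dict is B's zip row plus the cores_free default
theorem pvRowN_eq (parts : List String) (h : 5 ≤ parts.length)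
    (hs : ∀ p ∈ parts, PySem.Str.strip p = p) : pvA_rowN parts = pvB_rowN parts := by
  rcases parts with _ | ⟨p0, parts⟩; · simp at h
  rcases parts with _ | ⟨p1, parts⟩; · simp at h
  rcases parts with _ | ⟨p2, parts⟩; · simp at h
  rcases parts with _ | ⟨p3, parts⟩; · simp at h
  rcases parts with _ | ⟨p4, parts⟩; · simp at h
  rcases parts with _ | ⟨p5, parts⟩
  · simp [pvA_rowN, pvB_rowN, pvB_NODE_FIELDS, PySem.List.pyGetD_ofNat', hs p0 (by simp), hs p1 (by simp), hs p2 (by simp), hs p3 (by simp),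
          hs p4 (by simp)]
  · simp [pvA_rowN, pvB_rowN, pvB_NODE_FIELDS, PySem.List.pyGetD_ofNat', hs p0 (by simp), hs p1 (by simp), hs p2 (by simp), hs p3 (by simp),
          hs p4 (by simp), hs p5 (by simp)]

-- B's bucketing fold only appends: initial buckets factor out
theorem pvBucket_shift : ∀ (lines : List String) (b : Option Bool) (qls nls : List String),
    lines.foldl pvB_bucketStep (b, qls, nls) =
      ((lines.foldl pvB_bucketStep (b, [], [])).1,
       qls ++ (lines.foldl pvB_bucketStep (b, [], [])).2.1,
       nls ++ (lines.foldl pvB_bucketStep (b, [], [])).2.2) := by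
  intro lines
  induction lines with
  | nil => simp
  | cons l rest ih =>
    intro b qls nls
    simp only [List.foldl_cons, pvB_bucketStep]
    split_ifs with h1 h2 h3 h4
    · exact ih _ _ _
    · exact ih _ _ _
    · rw [ih _ (qls ++ [l]) nls, ih _ ([] ++ [l]) []]
      simp
    · rw [ih _ qls (nls ++ [l]), ih _ [] ([] ++ [l])]
      simp
    · exact ih _ _ _

-- main invariant: A's running lists are B's buckets pushed through the second pass
theorem pvMain : ∀ (lines : List String) (inQ inN : Bool)
    (qs ns : List (List (String × String))),
    (inQ && inN) = false →
    (lines.foldl pvA_step (inQ, inN, qs, ns)).2.2 =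
      (qs ++ (pvB_rows (lines.foldl pvB_bucketStep (pvToBucket inQ inN, [], [])).2.1 10).map pvB_rowQ,
       ns ++ (pvB_rows (lines.foldl pvB_bucketStep (pvToBucket inQ inN, [], [])).2.2 5).map pvB_rowN) := by
  intro lines
  induction lines with
  | nil => intro inQ inN qs ns _; simp [pvB_rows]
  | cons l rest ih =>
    intro inQ inN qs ns h
    simp only [List.foldl_cons]
    by_cases hq : (PySem.Str.isIn "QUEUE INFORMATION:" l || PySem.Str.isIn "Queue Name" l) = true
    · -- queue header line
      have hA : pvA_step (inQ, inN, qs, ns) l = (true, false, qs, ns) := by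
        simp at hq
        rcases hq with h' | h' <;> simp [pvA_step, h']
      have hB : pvB_bucketStep (pvToBucket inQ inN, [], []) l = (some true, [], []) := by
        simp at hq
        rcases hq with h' | h' <;> simp [pvB_bucketStep, h']
      rw [hA, hB]
      simpa [pvToBucket] using ih true false qs ns rfl
    · by_cases hn : (PySem.Str.isIn "NODE INFORMATION:" l || PySem.Str.isIn "Node Type" l) = true
      · -- node header line
        have hq' := hq; simp at hq'; obtain ⟨hq1, hq2⟩ := hq'
        have hA : pvA_step (inQ, inN, qs, ns) l = (false, true, qs, ns) := by
          simp at hn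
          rcases hn with h' | h' <;> simp [pvA_step, h', hq1, hq2]
        have hB : pvB_bucketStep (pvToBucket inQ inN, [], []) l = (some false, [], []) := by
          simp at hn
          rcases hn with h' | h' <;> simp [pvB_bucketStep, h', hq1, hq2]
        rw [hA, hB]
        simpa [pvToBucket] using ih false true qs ns rfl
      · -- not a header line
        have hq' := hq; simp at hq'; obtain ⟨hq1, hq2⟩ := hq'
        have hn' := hn; simp at hn'; obtain ⟨hn1, hn2⟩ := hn'
        by_cases hskip : (PySem.Str.startswith l "=" || PySem.Str.startswith l "-" ||
            PySem.Str.startswith l "|" || decide (PySem.Str.strip l = "")) = true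
        · -- ruling / blank line: A skips it, B buckets it but the second pass drops it
          simp at hskip
          have hA : pvA_step (inQ, inN, qs, ns) l = (inQ, inN, qs, ns) := by
            cases inQ <;> cases inN <;>
              (rcases hskip with ((h' | h') | h') | h' <;>
                simp [pvA_step, pvA_nodeStep, hq1, hq2, hn1, hn2, h'])
          have hrowsQ : ∀ xs, pvB_rows (l :: xs) 10 = pvB_rows xs 10 := by
            intro xs
            rcases hskip with ((h' | h') | h') | h' <;> simp [pvB_rows, h']
          have hrowsN : ∀ xs, pvB_rows (l :: xs) 5 = pvB_rows xs 5 := by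
            intro xs
            rcases hskip with ((h' | h') | h') | h' <;> simp [pvB_rows, h']
          rw [hA]
          cases inQ with
          | true =>
            have hB : pvB_bucketStep (pvToBucket true inN, [], []) l = (some true, [l], []) := by
              simp [pvB_bucketStep, pvToBucket, hq1, hq2, hn1, hn2]
            rw [hB, pvBucket_shift rest (some true) [l] []]
            simpa [hrowsQ, pvToBucket] using ih true inN qs ns h
          | false =>
            cases inN with
            | true =>
              have hB : pvB_bucketStep (pvToBucket false true, [], []) l = (some false, [], [l]) := by
                simp [pvB_bucketStep, pvToBucket, hq1, hq2, hn1, hn2]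
              rw [hB, pvBucket_shift rest (some false) [] [l]]
              simpa [hrowsN, pvToBucket] using ih false true qs ns rfl
            | false =>
              have hB : pvB_bucketStep (pvToBucket false false, [], []) l = (none, [], []) := by
                simp [pvB_bucketStep, pvToBucket, hq1, hq2, hn1, hn2]
              rw [hB]
              simpa [pvToBucket] using ih false false qs ns rfl
        · -- data line
          simp at hskip
          obtain ⟨⟨⟨hs1, hs2⟩, hs3⟩, hstrip⟩ := hskip
          have hsinv : ∀ p ∈ PySem.Str.split₀ l, PySem.Str.strip p = p := pvStrStrip_split₀ l
          cases inQ with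
          | true =>
            have hN : inN = false := by
              cases inN with
              | false => rfl
              | true => simp at h
            subst hN
            have hB : pvB_bucketStep (pvToBucket true false, [], []) l = (some true, [l], []) := by
              simp [pvB_bucketStep, pvToBucket, hq1, hq2, hn1, hn2]
            by_cases hlen : 10 ≤ (PySem.Str.split₀ l).length
            · have hA : pvA_step (true, false, qs, ns) l =
                  (true, false, qs ++ [pvA_rowQ (PySem.Str.split₀ l)], ns) := by
                simp [pvA_step, pvA_nodeStep, hq1, hq2, hn1, hn2, hs1, hs2, hs3, hstrip, hlen]
              have hrows : ∀ xs, pvB_rows (l :: xs) 10 = PySem.Str.split₀ l :: pvB_rows xs 10 := by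
                intro xs
                simp [pvB_rows, hs1, hs2, hs3, hstrip, hlen]
              rw [hA, hB, pvBucket_shift rest (some true) [l] []]
              simpa [hrows, pvToBucket, pvRowQ_eq _ hlen hsinv, List.append_assoc]
                using ih true false (qs ++ [pvA_rowQ (PySem.Str.split₀ l)]) ns rfl
            · have hA : pvA_step (true, false, qs, ns) l = (true, false, qs, ns) := by
                simp [pvA_step, pvA_nodeStep, hq1, hq2, hn1, hn2, hs1, hs2, hs3, hstrip, hlen]
              have hrows : ∀ xs, pvB_rows (l :: xs) 10 = pvB_rows xs 10 := by
                intro xs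
                simp [pvB_rows, hs1, hs2, hs3, hstrip, hlen]
              rw [hA, hB, pvBucket_shift rest (some true) [l] []]
              simpa [hrows, pvToBucket] using ih true false qs ns rfl
          | false =>
            cases inN with
            | true =>
              have hB : pvB_bucketStep (pvToBucket false true, [], []) l = (some false, [], [l]) := by
                simp [pvB_bucketStep, pvToBucket, hq1, hq2, hn1, hn2]
              by_cases hlen : 5 ≤ (PySem.Str.split₀ l).length
              · have hA : pvA_step (false, true, qs, ns) l =
                    (false, true, qs, ns ++ [pvA_rowN (PySem.Str.split₀ l)]) := by
                  simp [pvA_step, pvA_nodeStep, hq1, hq2, hn1, hn2, hs1, hs2, hs3, hstrip, hlen]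
                have hrows : ∀ xs, pvB_rows (l :: xs) 5 = PySem.Str.split₀ l :: pvB_rows xs 5 := by
                  intro xs
                  simp [pvB_rows, hs1, hs2, hs3, hstrip, hlen]
                rw [hA, hB, pvBucket_shift rest (some false) [] [l]]
                simpa [hrows, pvToBucket, pvRowN_eq _ hlen hsinv, List.append_assoc]
                  using ih false true qs (ns ++ [pvA_rowN (PySem.Str.split₀ l)]) rfl
              · have hA : pvA_step (false, true, qs, ns) l = (false, true, qs, ns) := by
                  simp [pvA_step, pvA_nodeStep, hq1, hq2, hn1, hn2, hs1, hs2, hs3, hstrip, hlen]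
                have hrows : ∀ xs, pvB_rows (l :: xs) 5 = pvB_rows xs 5 := by
                  intro xs
                  simp [pvB_rows, hs1, hs2, hs3, hstrip, hlen]
                rw [hA, hB, pvBucket_shift rest (some false) [] [l]]
                simpa [hrows, pvToBucket] using ih false true qs ns rfl
            | false =>
              have hA : pvA_step (false, false, qs, ns) l = (false, false, qs, ns) := by
                simp [pvA_step, pvA_nodeStep, hq1, hq2, hn1, hn2]
              have hB : pvB_bucketStep (pvToBucket false false, [], []) l = (none, [], []) := by
                simp [pvB_bucketStep, pvToBucket, hq1, hq2, hn1, hn2]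
              rw [hA, hB]
              simpa [pvToBucket] using ih false false qs ns rfl

-- ===== VERDICT (by name: the statement is the Claim_ definition above) =====
theorem parse_queue_output_py_spec : Claim_equal_parse_queue_output_py := by
  intro q _
  unfold Spec_parse_queue_output_py parse_queue_output_py parse_queue_output_py_alt
  have h := pvMain ((PySem.Str.split? (PySem.Str.strip q) "\n").getD []) false false [] [] rfl
  simp only [pvToBucket] at h
  simp only [h]
  simp
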